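-- pv_equiv track=rewrite | github.com/dongsik93/HomeStudy | etc/3번.py | solution
-- ===== SOURCE A (Python) =====
-- def solution(healths, items):
--     answer = []
--
--     for i in items:
--         for j in range(len(healths)):
--             if(healths[j] - i[1] >= 100):
--                     if(items.index(i)+1 not in answer):
--                         answer.append(items.index(i)+1)
--
--
--     return answer
-- ===== SOURCE B (Python) =====
-- def solution(healths, items):
--     if not healths:
--         return []
--     best = max(healths)
--     first = {}
--     for k, it in enumerate(items):
--         first.setdefault(tuple(it), k)
--     answer = []
--     seen = set()
--     for it in items:
--         if best - it[1] >= 100: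
--             idx = first[tuple(it)]
--             if idx not in seen:
--                 seen.add(idx)
--                 answer.append(idx + 1)
--     return answer
-- ===== Notes on version B (the rewrite author's own statement) =====
-- stated objective: faster
-- what changed: Replaced the per-item scan over all healths and the repeated items.index() list scans by a precomputed max(healths) and a first-occurrence index dict plus a seen-set, giving one pass over items.
import Mathlib
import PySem

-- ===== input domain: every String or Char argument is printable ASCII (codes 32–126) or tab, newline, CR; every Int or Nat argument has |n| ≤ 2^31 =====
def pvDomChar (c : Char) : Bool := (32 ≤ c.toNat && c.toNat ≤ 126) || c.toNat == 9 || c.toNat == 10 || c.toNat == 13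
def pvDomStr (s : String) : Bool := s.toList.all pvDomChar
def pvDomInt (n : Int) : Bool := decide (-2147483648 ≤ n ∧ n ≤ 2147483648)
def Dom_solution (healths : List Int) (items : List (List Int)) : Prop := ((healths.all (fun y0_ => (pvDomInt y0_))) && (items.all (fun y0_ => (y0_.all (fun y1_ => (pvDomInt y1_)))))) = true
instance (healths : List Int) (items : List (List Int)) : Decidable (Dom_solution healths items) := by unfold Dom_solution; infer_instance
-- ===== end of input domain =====

-- B replaces A's per-item scans (all healths, items.index) by max(healths), a first-occurrence
-- index dict and a seen-set: one pass over items (objective: faster).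

-- ===== PORT A =====
def solution (healths : List Int) (items : List (List Int)) : List Int :=
  items.foldl (fun answer i =>
    (PySem.List.pyRange 0 healths.length 1).foldl (fun answer j =>
      if PySem.List.pyGetD healths j 0 - PySem.List.pyGetD i 1 0 ≥ 100 then
        if ¬ (((PySem.List.index? items i).getD 0 : Int) + 1 ∈ answer) then
          answer ++ [((PySem.List.index? items i).getD 0 : Int) + 1]
        else answer
      else answer) answer) []

-- ===== PORT B =====
-- first.setdefault(k, v): insert only when absent; first[tuple(it)] ported as getD (key always present).
def solution_alt (healths : List Int) (items : List (List Int)) : List Int :=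
  match healths with
  | [] => []
  | h :: t =>
    let best := t.foldl max h
    let first := (PySem.List.enumerate items 0).foldl
      (fun (d : PySem.Dict (List Int) Int) p =>
        if d.contains p.2 then d else d.insert p.2 p.1) PySem.Dict.empty
    (items.foldl (fun (st : List Int × PySem.Set Int) it =>
      if best - PySem.List.pyGetD it 1 0 ≥ 100 then
        let idx := first.getD it 0
        if PySem.Set.contains st.2 idx then st
        else (st.1 ++ [idx + 1], PySem.Set.add st.2 idx)
      else st) ([], PySem.Set.empty)).1

-- ===== PRECONDITION & SPEC =====
-- Pre_ excludes exactly the inputs where Python A raises IndexError: a nonempty healths together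
-- with some item of length < 2 (then i[1] is evaluated and fails).
def Pre_solution (healths : List Int) (items : List (List Int)) : Prop :=
  healths = [] ∨ ∀ i ∈ items, 2 ≤ i.length
instance (healths : List Int) (items : List (List Int)) : Decidable (Pre_solution healths items) := by unfold Pre_solution; infer_instance

def pvWitness_solution : List Int × List (List Int) := ([200], [[1, 2]])

def Spec_solution (healths : List Int) (items : List (List Int)) (out : List Int) : Prop := out = solution_alt healths items
instance (healths : List Int) (items : List (List Int)) (out : List Int) : Decidable (Spec_solution healths items out) := by unfold Spec_solution; infer_instance

-- ===== CLAIM (what is proved, stated in full; the proofs are below) =====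
def Claim_equal_solution : Prop := ∀ (healths : List Int) (items : List (List Int)), Dom_solution healths items → Pre_solution healths items → Spec_solution healths items (solution healths items)

-- ===== LEMMAS AND PROOFS =====

-- appendIfNew core lemma for A's inner loop
lemma inner_loop (xs : List Int) (c v : Int) (ans : List Int) :
    xs.foldl (fun a x => if x - c ≥ 100 then (if ¬ (v ∈ a) then a ++ [v] else a) else a) ans
      = if ∃ x ∈ xs, x - c ≥ 100 then (if ¬ (v ∈ ans) then ans ++ [v] else ans) else ans := by
  induction xs generalizing ans with
  | nil => simp
  | cons x t ih =>
    simp only [List.foldl_cons]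
    by_cases hx : x - c ≥ 100
    · rw [if_pos hx, ih]
      have hv : v ∈ (if ¬ (v ∈ ans) then ans ++ [v] else ans) := by
        by_cases h : v ∈ ans
        · rw [if_neg (not_not_intro h)]; exact h
        · rw [if_pos h]; exact List.mem_append_right _ (List.mem_singleton_self v)
      have hstep : (if ¬ (v ∈ (if ¬ (v ∈ ans) then ans ++ [v] else ans)) then (if ¬ (v ∈ ans) then ans ++ [v] else ans) ++ [v] else (if ¬ (v ∈ ans) then ans ++ [v] else ans)) = (if ¬ (v ∈ ans) then ans ++ [v] else ans) := by
      -- if-collapse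
        rw [if_neg (not_not_intro hv)]
      have hex : (∃ y ∈ x :: t, y - c ≥ 100) := ⟨x, by simp, hx⟩
      rw [if_pos hex]
      split_ifs with h2 <;> simp_all
    · rw [if_neg hx, ih]
      have : (∃ y ∈ x :: t, y - c ≥ 100) ↔ (∃ y ∈ t, y - c ≥ 100) := by
        constructor
        · rintro ⟨y, hy, hyc⟩
          rcases List.mem_cons.mp hy with rfl | hy'
          · exact absurd hyc hx
          · exact ⟨y, hy', hyc⟩
        · rintro ⟨y, hy, hyc⟩; exact ⟨y, List.mem_cons_of_mem _ hy, hyc⟩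
      rw [if_congr this rfl rfl]

-- the setdefault fold over enumerate
def buildStep (d : PySem.Dict (List Int) Int) (p : Int × List Int) : PySem.Dict (List Int) Int :=
  if d.contains p.2 then d else d.insert p.2 p.1

lemma build_preserve (l : List (List Int)) (s : Int) (d : PySem.Dict (List Int) Int)
    (it : List Int) (hd : d.contains it = true) :
    ((PySem.List.enumerate l s).foldl buildStep d).get? it = d.get? it := by
  induction l generalizing s d with
  | nil => simp [PySem.List.enumerate_nil]
  | cons x t ih =>
    rw [PySem.List.enumerate_cons, List.foldl_cons]
    by_cases hx : d.contains x = true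
    · rw [show buildStep d (s, x) = d by simp [buildStep, hx]]
      exact ih _ _ hd
    · rw [show buildStep d (s, x) = d.insert x s by simp [buildStep, hx]]
      have hne : x ≠ it := by rintro rfl; exact hx hd
      have : (d.insert x s).contains it = true := by
        rw [PySem.Dict.contains_insert]; simp [hd]
      rw [ih _ _ this, PySem.Dict.get?_insert_of_ne d s (Ne.symm hne)]

lemma build_fresh (l : List (List Int)) (s : Int) (d : PySem.Dict (List Int) Int)
    (it : List Int) (hmem : it ∈ l) (hd : d.contains it = false) :
    ((PySem.List.enumerate l s).foldl buildStep d).get? it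
      = some (s + ((PySem.List.index? l it).getD 0 : Int)) := by
  induction l generalizing s d with
  | nil => simp at hmem
  | cons x t ih =>
    rw [PySem.List.enumerate_cons, List.foldl_cons]
    by_cases hx : x = it
    · subst hx
      rw [show buildStep d (s, x) = d.insert x s by simp [buildStep, hd]]
      have hc : (d.insert x s).contains x = true := PySem.Dict.contains_insert_self d x s
      rw [build_preserve t (s+1) _ x hc, PySem.Dict.get?_insert_self d x s,
        PySem.List.index?_cons_self]
      simp
    · have hmem' : it ∈ t := by 
        rcases List.mem_cons.mp hmem with rfl | h
        · exact absurd rfl hx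
        · exact h
      have hidx : (PySem.List.index? t it).isSome := (PySem.List.index?_isSome_iff t it).mpr hmem'
      obtain ⟨k, hk⟩ := Option.isSome_iff_exists.mp hidx
      have hcons : PySem.List.index? (x :: t) it = some (k + 1) := by
        rw [PySem.List.index?_cons_of_ne _ hx, hk]; rfl
      by_cases hcx : d.contains x = true
      · rw [show buildStep d (s, x) = d by simp [buildStep, hcx]]
        rw [ih _ _ hmem' hd, hk, hcons]
        simp; ring
      · rw [show buildStep d (s, x) = d.insert x s by simp [buildStep, hcx]]
        have hd' : (d.insert x s).contains it = false := by
          rw [PySem.Dict.contains_insert]; simp [hd]; exact fun h => hx h.symm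
        rw [ih _ _ hmem' hd', hk, hcons]
        simp; ring

lemma pair_loop (cond : List Int → Prop) [DecidablePred cond] (idx : List Int → Int)
    (l : List (List Int)) (ans : List Int) (seen : PySem.Set Int)
    (hinv : ∀ x : Int, x ∈ seen ↔ x + 1 ∈ ans) :
    l.foldl (fun a i => if cond i then (if ¬ (idx i + 1 ∈ a) then a ++ [idx i + 1] else a) else a) ans
      = (l.foldl (fun (st : List Int × PySem.Set Int) i =>
          if cond i then
            (if PySem.Set.contains st.2 (idx i) then st
             else (st.1 ++ [idx i + 1], PySem.Set.add st.2 (idx i)))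
          else st) (ans, seen)).1 := by
  induction l generalizing ans seen with
  | nil => simp
  | cons i t ih =>
    simp only [List.foldl_cons]
    by_cases hc : cond i
    · rw [if_pos hc, if_pos hc]
      by_cases hs : idx i ∈ seen
      · rw [if_pos ((PySem.Set.contains_iff seen (idx i)).mpr hs),
          if_neg (not_not_intro ((hinv (idx i)).mp hs))]
        exact ih ans seen hinv
      · have h1 : ¬ (PySem.Set.contains seen (idx i) = true) :=
          fun h => hs ((PySem.Set.contains_iff seen (idx i)).mp h)
        have h2 : ¬ (idx i + 1 ∈ ans) := fun h => hs ((hinv (idx i)).mpr h)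
        rw [if_pos h2, if_neg h1]
        refine ih _ _ ?_
        intro x
        rw [PySem.Set.mem_add]
        constructor
        · rintro (h | rfl)
          · exact List.mem_append_left _ ((hinv x).mp h)
          · exact List.mem_append_right _ (List.mem_singleton_self _)
        · intro h
          rcases List.mem_append.mp h with h | h
          swap
          · rw [List.mem_singleton] at h
            exact Or.inr (by omega)
          · exact Or.inl ((hinv x).mpr h)
    · rw [if_neg hc, if_neg hc]; exact ih ans seen hinv

lemma solution_eq_alt (healths : List Int) (items : List (List Int)) :
    Spec_solution healths items (solution healths items) := by
  unfold Spec_solution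
  match healths with
  | [] =>
    simp [solution, solution_alt, PySem.List.pyRange_one_eq_nil, List.foldl_fixed]
  | h :: t =>
    have hmax : ∀ c : Int, (∃ x ∈ h :: t, x - c ≥ 100) ↔ (t.foldl max h - c ≥ 100) := by
      intro c
      constructor
      · rintro ⟨x, hx, hxc⟩
        have hle := PySem.List.max?_isMax (xs := h::t) (key := fun y => y) (PySem.List.max?_id_cons h t) x hx
        simp only at hle
        omega
      · intro hb
        exact ⟨t.foldl max h, PySem.List.max?_mem (PySem.List.max?_id_cons h t), hb⟩
    have hA : solution (h :: t) items
        = items.foldl (fun a i =>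
            if t.foldl max h - PySem.List.pyGetD i 1 0 ≥ 100 then
              (if ¬ (((PySem.List.index? items i).getD 0 : Int) + 1 ∈ a) then
                a ++ [((PySem.List.index? items i).getD 0 : Int) + 1] else a)
            else a) [] := by
      unfold solution
      apply PySem.List.foldl_congr_mem
      intro acc i _
      rw [PySem.List.foldl_pyRange_zero_pyGetD' (h :: t) 0
        (fun a x => if x - PySem.List.pyGetD i 1 0 ≥ 100 then
          (if ¬ (((PySem.List.index? items i).getD 0 : Int) + 1 ∈ a) then
            a ++ [((PySem.List.index? items i).getD 0 : Int) + 1] else a)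
          else a) acc]
      rw [inner_loop, if_congr (hmax _) rfl rfl]
    have hdict : ∀ i ∈ items,
        (((PySem.List.enumerate items 0).foldl buildStep PySem.Dict.empty).getD i 0 : Int)
          = ((PySem.List.index? items i).getD 0 : Int) := by
      intro i hi
      have := build_fresh items 0 PySem.Dict.empty i hi (by simp)
      rw [PySem.Dict.getD_eq_get?_getD, this]
      simp
    have hB : solution_alt (h :: t) items
        = (items.foldl (fun (st : List Int × PySem.Set Int) i =>
            if t.foldl max h - PySem.List.pyGetD i 1 0 ≥ 100 then
              (if PySem.Set.contains st.2 (((PySem.List.index? items i).getD 0 : Int)) then st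
               else (st.1 ++ [((PySem.List.index? items i).getD 0 : Int) + 1],
                     PySem.Set.add st.2 (((PySem.List.index? items i).getD 0 : Int))))
            else st) ([], PySem.Set.empty)).1 := by
      unfold solution_alt
      simp only []
      rw [show (fun (d : PySem.Dict (List Int) Int) (p : Int × List Int) =>
        if d.contains p.2 then d else d.insert p.2 p.1) = buildStep from rfl]
      congr 1
      apply PySem.List.foldl_congr_mem
      intro st i hi
      rw [hdict i hi]
    rw [hA, hB]
    exact pair_loop _ _ items [] PySem.Set.empty (by simp [PySem.Set.empty])

-- ===== VERDICT (by name: the statement is the Claim_ definition above) =====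
theorem solution_spec : Claim_equal_solution := by
  intro healths items _ _
  exact solution_eq_alt healths items
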